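-- pv_equiv track=rewrite | github.com/inaciovasquez2020/chronos-urf-rr | tools/verify_ball_volume_acyclicity.py | volume_bound
-- ===== SOURCE A (Python) =====
-- def volume_bound(delta: int, radius: int) -> int:
--     if radius == 0:
--         return 1
--     if delta <= 0:
--         return 1
--     if delta == 1:
--         return 2
--     return 1 + delta * sum((delta - 1) ** j for j in range(radius))
-- ===== SOURCE B (Python) =====
-- def volume_bound(delta: int, radius: int) -> int:
--     if radius == 0 or delta <= 0:
--         return 1
--     if delta == 1:
--         return 2
--     if radius < 0:
--         return 1  # empty geometric series
--     if delta == 2: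
--         return 1 + 2 * radius
--     # closed form of the geometric series sum_{j<radius} (delta-1)^j
--     return 1 + delta * (((delta - 1) ** radius - 1) // (delta - 2))
-- ===== Notes on version B (the rewrite author's own statement) =====
-- stated objective: faster
-- what changed: Replaces the O(radius)-term geometric-series summation loop with the closed form ((delta-1)^radius - 1) // (delta-2) computed by one exponentiation (delta==2 handled as 1+2*radius).
import Mathlib
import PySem

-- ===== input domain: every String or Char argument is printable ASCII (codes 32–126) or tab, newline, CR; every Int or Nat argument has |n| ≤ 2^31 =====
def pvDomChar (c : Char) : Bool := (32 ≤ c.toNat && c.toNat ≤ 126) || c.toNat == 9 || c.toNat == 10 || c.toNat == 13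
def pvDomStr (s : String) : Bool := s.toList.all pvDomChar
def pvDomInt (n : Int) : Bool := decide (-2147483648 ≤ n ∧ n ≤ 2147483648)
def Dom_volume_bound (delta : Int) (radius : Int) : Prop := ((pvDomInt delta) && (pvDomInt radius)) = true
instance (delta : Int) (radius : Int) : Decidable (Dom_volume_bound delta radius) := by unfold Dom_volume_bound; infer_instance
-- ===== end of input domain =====

-- B replaces A's O(radius)-term geometric summation by the closed form with one exponentiation (faster).

-- ===== PORT A =====
-- '(delta-1) ** j' with j drawn from range(radius), so j ≥ 0: exactly '^ j.toNat'
def volume_bound (delta : Int) (radius : Int) : Int :=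
  if radius = 0 then 1
  else if delta ≤ 0 then 1
  else if delta = 1 then 2
  else 1 + delta * ((PySem.List.pyRange 0 radius 1).map (fun j => (delta - 1) ^ j.toNat)).sum

-- ===== PORT B =====
-- '(delta-1) ** radius' here has radius > 0: exactly '^ radius.toNat'
def volume_bound_alt (delta : Int) (radius : Int) : Int :=
  if radius = 0 ∨ delta ≤ 0 then 1
  else if delta = 1 then 2
  else if radius < 0 then 1
  else if delta = 2 then 1 + 2 * radius
  else 1 + delta * PySem.Int.floordiv ((delta - 1) ^ radius.toNat - 1) (delta - 2)

-- ===== PRECONDITION & SPEC =====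
def Spec_volume_bound (delta : Int) (radius : Int) (out : Int) : Prop := out = volume_bound_alt delta radius
instance (delta : Int) (radius : Int) (out : Int) : Decidable (Spec_volume_bound delta radius out) := by unfold Spec_volume_bound; infer_instance

-- ===== CLAIM (what is proved, stated in full; the proofs are below) =====
def Claim_equal_volume_bound : Prop := ∀ (delta : Int) (radius : Int), Dom_volume_bound delta radius → Spec_volume_bound delta radius (volume_bound delta radius)

-- ===== LEMMAS AND PROOFS =====

-- geometric sum identity over List.range
theorem pv_geom_mul (x : Int) (n : Nat) :
    (((List.range n).map (fun j => x ^ j)).sum) * (x - 1) = x ^ n - 1 := by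
  induction n with
  | zero => simp
  | succ n ih =>
    rw [List.range_succ, List.map_append, List.sum_append]
    simp only [List.map_cons, List.map_nil, List.sum_cons, List.sum_nil]
    ring_nf
    ring_nf at ih
    linarith [ih]

theorem pv_sum_eq (delta : Int) (radius : Int) :
    ((PySem.List.pyRange 0 radius 1).map (fun j => (delta - 1) ^ j.toNat)).sum
      = ((List.range radius.toNat).map (fun j => (delta - 1) ^ j)).sum := by
  rw [PySem.List.pyRange_one, List.map_map]
  simp only [Int.sub_zero]
  congr 1
  apply List.map_congr_left
  intro k hk
  simp

theorem volume_bound_spec : Claim_equal_volume_bound := by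
  intro delta radius _
  unfold Spec_volume_bound volume_bound volume_bound_alt
  by_cases h0 : radius = 0
  · simp [h0]
  · by_cases hd0 : delta ≤ 0
    · simp [h0, hd0]
    · by_cases hd1 : delta = 1
      · simp [h0, hd1]
      · by_cases hrn : radius < 0
        · have : PySem.List.pyRange 0 radius 1 = [] :=
            PySem.List.pyRange_one_eq_nil (by omega)
          simp [h0, hd0, hd1, hrn, this]
        · have hr : 0 < radius := by omega
          rw [pv_sum_eq delta radius]
          by_cases hd2 : delta = 2
          · have : ((List.range radius.toNat).map (fun j => (delta - 1) ^ j)).sum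
                = (radius.toNat : Int) := by
              subst hd2; simp
            simp only [h0, hrn, hd2, if_false, if_true, false_or]
            have : (radius.toNat : Int) = radius := by omega
            simp [this]
          · have hd3 : 3 ≤ delta := by omega
            set S := ((List.range radius.toNat).map (fun j => (delta - 1) ^ j)).sum with hS
            have hmul : S * (delta - 2) = (delta - 1) ^ radius.toNat - 1 := by
              have := pv_geom_mul (delta - 1) radius.toNat
              rw [← hS] at this
              calc S * (delta - 2) = S * ((delta - 1) - 1) := by ring
                _ = (delta - 1) ^ radius.toNat - 1 := this
            have hfd : PySem.Int.floordiv ((delta - 1) ^ radius.toNat - 1) (delta - 2) = S := by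
              rw [← hmul]
              rw [PySem.Int.floordiv_eq_iff_of_pos (by omega)]
              constructor
              · exact le_refl _
              · nlinarith [sq_nonneg (delta - 2)]
            simp [h0, hd0, hd1, hrn, hd2, hfd]

-- ===== VERDICT (by name: the statement is the Claim_ definition above) =====
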